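-- pv_equiv track=rewrite | github.com/rayashi/algorithms | passing_cars/passing_cars.py | passing_cars
-- ===== SOURCE A (Python) =====
-- def passing_cars(number):
--     count = 0
--     east_cars = []
--     west_cars = []
--
--     index = 0
--     for number in number:
--         if number == 0:
--             east_cars.append(index)
--         else:
--             west_cars.append(index)
--         index += 1
--
--     index = 0
--     for east_car in east_cars:
--
--         for west_car in west_cars[index:]:
--             if west_car > east_car:
--                 break
--             index += 1
--
--         count += len(west_cars[index:])
--
--     return count
-- ===== SOURCE B (Python) =====
-- def passing_cars(number):
--     zeros = 0
--     total = 0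
--     for x in number:
--         if x == 0:
--             zeros += 1
--         else:
--             total += zeros
--     return total
-- ===== Notes on version B (the rewrite author's own statement) =====
-- stated objective: simpler
-- what changed: Replaced the two-phase construction of east/west index lists with a pointer-and-slice scan by a single pass that keeps a running count of eastbound cars (zeros) and adds it to the total at each westbound car.
import Mathlib
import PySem

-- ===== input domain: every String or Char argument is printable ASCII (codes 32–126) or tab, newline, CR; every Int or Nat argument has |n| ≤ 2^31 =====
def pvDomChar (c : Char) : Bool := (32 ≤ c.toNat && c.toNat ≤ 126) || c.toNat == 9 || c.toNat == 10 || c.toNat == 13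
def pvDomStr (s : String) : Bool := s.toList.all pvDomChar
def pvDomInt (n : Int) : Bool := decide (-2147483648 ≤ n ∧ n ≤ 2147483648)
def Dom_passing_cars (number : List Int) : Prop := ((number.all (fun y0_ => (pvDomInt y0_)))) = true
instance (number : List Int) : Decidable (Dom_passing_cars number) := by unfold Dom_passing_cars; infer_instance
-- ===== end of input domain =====

-- B replaces A's two-phase index-list and pointer/slice scan by a single pass with a running count of zeros (simpler).

-- ===== PORT A =====
-- inner 'for west_car in west_cars[index:]' loop: counts the leading slice elements ≤ east_car
def pcSkip (e : Int) : List Int → Int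
  | [] => 0
  | w :: ws => if w > e then 0 else 1 + pcSkip e ws

-- outer 'for east_car in east_cars' loop with mutable index and count
def pcOuter (west : List Int) : List Int → Int → Int → Int
  | [], _idx, count => count
  | e :: es, idx, count =>
      let idx' := idx + pcSkip e (PySem.List.slice west (some idx) none)
      pcOuter west es idx' (count + ((PySem.List.slice west (some idx') none).length : Int))

-- first loop: split indices into east_cars (zeros) and west_cars (non-zeros)
def pcSplit : List Int → Int → List Int → List Int → List Int × List Int
  | [], _idx, east, west => (east, west)
  | x :: xs, idx, east, west =>
      if x = 0 then pcSplit xs (idx + 1) (east ++ [idx]) west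
      else pcSplit xs (idx + 1) east (west ++ [idx])

def passing_cars (number : List Int) : Int :=
  let ew := pcSplit number 0 [] []
  pcOuter ew.2 ew.1 0 0

-- ===== PORT B =====
def passing_cars_alt (number : List Int) : Int :=
  (number.foldl (fun s x => if x = 0 then (s.1 + 1, s.2) else (s.1, s.2 + s.1))
    ((0 : Int), (0 : Int))).2

-- ===== PRECONDITION & SPEC =====
def Spec_passing_cars (number : List Int) (out : Int) : Prop := out = passing_cars_alt number
instance (number : List Int) (out : Int) : Decidable (Spec_passing_cars number out) := by unfold Spec_passing_cars; infer_instance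

-- ===== CLAIM (what is proved, stated in full; the proofs are below) =====
def Claim_equal_passing_cars : Prop := ∀ (number : List Int), Dom_passing_cars number → Spec_passing_cars number (passing_cars number)

-- ===== LEMMAS AND PROOFS =====

theorem pcSkip_nonneg (e : Int) (s : List Int) : 0 ≤ pcSkip e s := by
  induction s with
  | nil => simp [pcSkip]
  | cons w ws ih => simp only [pcSkip]; split <;> omega

theorem pcSkip_le (e : Int) (s : List Int) : pcSkip e s ≤ s.length := by
  induction s with
  | nil => simp [pcSkip]
  | cons w ws ih => simp only [pcSkip, List.length_cons]; split <;> push_cast <;> omega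

theorem pcSkip_append_gt {e n : Int} (h : e < n) (s : List Int) :
    pcSkip e (s ++ [n]) = pcSkip e s := by
  induction s with
  | nil => simp [pcSkip]; omega
  | cons w ws ih => simp only [List.cons_append, pcSkip, ih]

theorem pcSkip_all_le {e : Int} {s : List Int} (h : ∀ w ∈ s, ¬ e < w) :
    pcSkip e s = s.length := by
  induction s with
  | nil => simp [pcSkip]
  | cons w ws ih =>
      simp only [pcSkip, List.length_cons]
      rw [if_neg (h w (by simp)), ih (fun w hw => h w (by simp [hw]))]
      push_cast; omega

theorem pcOuter_count (W es : List Int) (idx c d : Int) :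
    pcOuter W es idx (c + d) = pcOuter W es idx c + d := by
  induction es generalizing idx c with
  | nil => simp [pcOuter]
  | cons e es ih =>
      simp only [pcOuter]
      rw [add_right_comm c d _, ih]

theorem pcOuter_west_append {n : Int} (es : List Int) (W : List Int) (idx c : Int)
    (he : ∀ e ∈ es, e < n) (h0 : 0 ≤ idx) (hle : idx.toNat ≤ W.length) :
    pcOuter (W ++ [n]) es idx c = pcOuter W es idx c + es.length := by
  induction es generalizing idx c with
  | nil => simp [pcOuter]
  | cons e es ih =>
      have hen : e < n := he e (by simp)
      have hsl : PySem.List.slice (W ++ [n]) (some idx) none = W.drop idx.toNat ++ [n] := by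
        rw [PySem.List.slice_from _ h0, List.drop_append_of_le_length hle]
      have hslW : PySem.List.slice W (some idx) none = W.drop idx.toNat :=
        PySem.List.slice_from _ h0
      simp only [pcOuter, hsl, hslW, pcSkip_append_gt hen]
      set k := pcSkip e (W.drop idx.toNat) with hk
      have hk0 : 0 ≤ k := pcSkip_nonneg _ _
      have hkle : k ≤ (W.drop idx.toNat).length := pcSkip_le _ _
      have hdl : (W.drop idx.toNat).length = W.length - idx.toNat := by simp
      have h0' : 0 ≤ idx + k := by omega
      have hle' : (idx + k).toNat ≤ W.length := by omega
      have hsl' : PySem.List.slice (W ++ [n]) (some (idx + k)) none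
          = W.drop (idx + k).toNat ++ [n] := by
        rw [PySem.List.slice_from _ h0', List.drop_append_of_le_length hle']
      have hslW' : PySem.List.slice W (some (idx + k)) none = W.drop (idx + k).toNat :=
        PySem.List.slice_from _ h0'
      rw [hsl', hslW']
      have hlen : ((W.drop (idx + k).toNat ++ [n]).length : Int)
          = ((W.drop (idx + k).toNat).length : Int) + 1 := by simp
      rw [hlen, ← add_assoc, pcOuter_count,
        ih _ _ (fun e' he' => he e' (List.mem_cons_of_mem _ he')) h0' hle']
      push_cast [List.length_cons]; ring

theorem pcOuter_east_append {n : Int} (es : List Int) (W : List Int) (idx c : Int)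
    (hw : ∀ w ∈ W, w < n) (h0 : 0 ≤ idx) (hle : idx.toNat ≤ W.length) :
    pcOuter W (es ++ [n]) idx c = pcOuter W es idx c := by
  induction es generalizing idx c with
  | nil =>
      simp only [List.nil_append, pcOuter]
      have hslW : PySem.List.slice W (some idx) none = W.drop idx.toNat :=
        PySem.List.slice_from _ h0
      rw [hslW, pcSkip_all_le (fun w hwm => by
        have := hw w (List.mem_of_mem_drop hwm); omega)]
      have hdl : (W.drop idx.toNat).length = W.length - idx.toNat := by simp
      have h0' : 0 ≤ idx + ((W.drop idx.toNat).length : Int) := by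
        have := pcSkip_nonneg n (W.drop idx.toNat); omega
      have : (idx + ((W.drop idx.toNat).length : Int)).toNat = W.length := by omega
      rw [PySem.List.slice_from _ h0', this]
      simp
  | cons e es ih =>
      have hslW : PySem.List.slice W (some idx) none = W.drop idx.toNat :=
        PySem.List.slice_from _ h0
      simp only [List.cons_append, pcOuter, hslW]
      set k := pcSkip e (W.drop idx.toNat) with hk
      have hk0 : 0 ≤ k := pcSkip_nonneg _ _
      have hkle : k ≤ (W.drop idx.toNat).length := pcSkip_le _ _
      have hdl : (W.drop idx.toNat).length = W.length - idx.toNat := by simp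
      exact ih _ _ (by omega) (by omega)

theorem pcSplit_append (l : List Int) (x : Int) (idx : Int) (e w : List Int) :
    pcSplit (l ++ [x]) idx e w =
      if x = 0 then ((pcSplit l idx e w).1 ++ [idx + l.length], (pcSplit l idx e w).2)
      else ((pcSplit l idx e w).1, (pcSplit l idx e w).2 ++ [idx + l.length]) := by
  induction l generalizing idx e w with
  | nil => by_cases hx : x = 0 <;> simp [pcSplit, hx]
  | cons z l ih =>
      have h : idx + 1 + (l.length : Int) = idx + ((l.length : Int) + 1) := by ring
      by_cases hz : z = 0 <;>
        simp only [List.cons_append, pcSplit, hz, ite_true, ite_false, List.length_cons,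
          Nat.cast_add, Nat.cast_one] <;> rw [ih, h]

theorem pcSplit_lt (l : List Int) (idx : Int) (e w : List Int) (N : Int)
    (hN : idx + l.length ≤ N)
    (he : ∀ y ∈ e, y < N) (hw : ∀ y ∈ w, y < N) :
    (∀ y ∈ (pcSplit l idx e w).1, y < N) ∧ (∀ y ∈ (pcSplit l idx e w).2, y < N) := by
  induction l generalizing idx e w with
  | nil => exact ⟨he, hw⟩
  | cons z l ih =>
      have hN' : idx + 1 + (l.length : Int) ≤ N := by
        push_cast [List.length_cons] at hN; omega
      have hidx : idx < N := by
        have : (0 : Int) ≤ (l.length : Int) := by positivity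
        omega
      by_cases hz : z = 0
      · simp only [pcSplit, hz, ite_true]
        exact ih (idx + 1) (e ++ [idx]) w hN'
          (by intro y hy; rcases List.mem_append.mp hy with h | h
              · exact he y h
              · simp at h; omega) hw
      · simp only [pcSplit, hz, ite_false]
        exact ih (idx + 1) e (w ++ [idx]) hN' he
          (by intro y hy; rcases List.mem_append.mp hy with h | h
              · exact hw y h
              · simp at h; omega)

theorem pcSplit_east_length (l : List Int) (idx : Int) (e w : List Int) :
    (pcSplit l idx e w).1.length = e.length + l.countP (fun x => x == 0) := by
  induction l generalizing idx e w with
  | nil => simp [pcSplit]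
  | cons z l ih =>
      by_cases hz : z = 0 <;>
        simp [pcSplit, hz, ih] <;> omega

theorem alt_fst (l : List Int) (z t : Int) :
    (l.foldl (fun s x => if x = 0 then (s.1 + 1, s.2) else (s.1, s.2 + s.1)) (z, t)).1
      = z + l.countP (fun x => x == 0) := by
  induction l generalizing z t with
  | nil => simp
  | cons x l ih =>
      by_cases hx : x = 0 <;> simp [hx, List.foldl_cons, ih] <;> omega

theorem passing_cars_eq (l : List Int) : passing_cars l = passing_cars_alt l := by
  induction l using List.reverseRecOn with
  | nil => rfl
  | append_singleton l x ih =>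
      unfold passing_cars passing_cars_alt at ih ⊢
      have hb := pcSplit_lt l 0 [] [] (l.length : Int) (by simp) (by simp) (by simp)
      rw [pcSplit_append, List.foldl_append]
      by_cases hx : x = 0
      · simp only [hx, ite_true, zero_add]
        rw [pcOuter_east_append _ _ 0 0 (fun w hw => hb.2 w hw) le_rfl (by simp)]
        exact ih
      · simp only [hx, ite_false, zero_add]
        rw [pcOuter_west_append _ _ 0 0 (fun e he => hb.1 e he) le_rfl (by simp)]
        have hE : ((pcSplit l 0 [] []).1.length : Int)
            = (l.foldl (fun s x => if x = 0 then (s.1 + 1, s.2) else (s.1, s.2 + s.1))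
                ((0 : Int), (0 : Int))).1 := by
          rw [pcSplit_east_length, alt_fst]; simp
        rw [ih, hE]
        simp [hx]

-- ===== VERDICT (by name: the statement is the Claim_ definition above) =====
theorem passing_cars_spec : Claim_equal_passing_cars := by
  intro number _
  unfold Spec_passing_cars
  exact passing_cars_eq number
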